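-- pv_equiv track=rewrite | github.com/GyanPrakashkushwaha/DSA | graph/all-algos-implementation/grid-implementation.py | dfsGrid
-- ===== SOURCE A (Python) =====
-- def dfsGrid(grid):
--     n, m = len(grid), len(grid[0])
--     visited = [[0]*m for _ in range(n)]
--     directions = [(-1,0), (1,0), (0,1), (0,-1)] # UP DOWN RIGHT LEFT
--
--     result = []
--     def dfs(r,c):
--         visited[r][c] = 1
--         result.append((r,c))
--
--         for dr, dc in directions:
--             nr, nc = r + dr, c + dc
--             if 0 <= nr < n and 0 <= nc < m and not visited[nr][nc] and grid[nr][nc] == 1: # Assuming the nodes present are represented by 1 in a cell.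
--                 dfs(nr, nc)
--
--     for r in range(n):
--         for c in range(m):
--             if grid[r][c] == 1 and not visited[r][c]:
--                 dfs(r,c)
--
--     return result
-- ===== SOURCE B (Python) =====
-- def dfsGrid(grid):
--     n, m = len(grid), len(grid[0])
--     visited = [[0] * m for _ in range(n)]
--     result = []
--     for r in range(n):
--         for c in range(m):
--             if grid[r][c] == 1 and not visited[r][c]:
--                 stack = [(r, c)]
--                 while stack:
--                     pr, pc = stack.pop()
--                     if visited[pr][pc]:
--                         continue
--                     visited[pr][pc] = 1
--                     result.append((pr, pc))
--                     # push neighbors in reversed direction order (LEFT, RIGHT, DOWN, UP)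
--                     # so that UP is popped first, reproducing recursive pre-order
--                     for dr, dc in ((0, -1), (0, 1), (1, 0), (-1, 0)):
--                         nr, nc = pr + dr, pc + dc
--                         if 0 <= nr < n and 0 <= nc < m and grid[nr][nc] == 1:
--                             stack.append((nr, nc))
--     return result
-- ===== Notes on version B (the rewrite author's own statement) =====
-- stated objective: alternative
-- what changed: A's recursive dfs helper is replaced by an explicit-stack iterative DFS that marks cells at pop time and pushes in-bounds 1-neighbors in reversed direction order, reproducing the same pre-order without recursion (no Python recursion-depth limit).
import Mathlib
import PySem

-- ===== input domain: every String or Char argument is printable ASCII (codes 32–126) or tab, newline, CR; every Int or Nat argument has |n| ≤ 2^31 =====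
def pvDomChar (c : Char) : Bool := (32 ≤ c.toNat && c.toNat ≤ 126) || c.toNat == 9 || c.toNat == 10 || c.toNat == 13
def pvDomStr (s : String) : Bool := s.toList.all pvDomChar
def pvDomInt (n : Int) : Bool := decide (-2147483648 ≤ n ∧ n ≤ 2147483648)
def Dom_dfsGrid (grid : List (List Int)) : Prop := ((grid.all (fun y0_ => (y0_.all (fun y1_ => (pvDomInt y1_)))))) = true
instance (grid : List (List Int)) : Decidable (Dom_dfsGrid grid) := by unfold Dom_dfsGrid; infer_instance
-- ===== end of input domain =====

-- B replaces A's recursive helper by an explicit-stack iterative DFS (mark at pop, neighbors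
-- pushed in reversed direction order), same traversal order; objective: alternative decomposition.

-- ===== PORT A =====
-- Python's `visited` is a list of 0/1 rows; represented as List (List Bool) (0 ↦ false, 1 ↦ true).
-- Out-of-range reads of `visited` return `true`; they never occur in either Python's executions.
def pvGridAt (grid : List (List Int)) (r c : Nat) : Int := (grid.getD r []).getD c 0
def pvVget (v : List (List Bool)) (r c : Nat) : Bool := (v.getD r []).getD c true
def pvVset (v : List (List Bool)) (r c : Nat) : List (List Bool) := v.set r ((v.getD r []).set c true)
def pvCountFalse (v : List (List Bool)) : Nat := (v.map (fun row => row.count false)).sum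

-- measure lemmas cited by the ports' termination proofs
theorem pvRow_lt (row : List Bool) : ∀ (c : Nat), row.getD c true = false →
    (row.set c true).count false < row.count false := by
  induction row with
  | nil => intro c h; simp [List.getD] at h
  | cons a l ih =>
    intro c h
    cases c with
    | zero =>
      simp [List.getD] at h
      subst h
      simp
    | succ k =>
      have hk := ih k (by simpa [List.getD] using h)
      simp [List.count_cons]
      omega

theorem pvVset_lt (v : List (List Bool)) : ∀ (r c : Nat), pvVget v r c = false →
    pvCountFalse (pvVset v r c) < pvCountFalse v := by
  induction v with
  | nil => intro r c h; simp [pvVget, List.getD] at h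
  | cons row rs ih =>
    intro r c h
    cases r with
    | zero =>
      have hrow := pvRow_lt row c (by simpa [pvVget, List.getD] using h)
      simp [pvVset, pvCountFalse, List.getD]
      omega
    | succ k =>
      have hk := ih k c (by simpa [pvVget, List.getD] using h)
      simp [pvVset, pvCountFalse, List.getD] at hk ⊢
      omega

def dirs4 : List (Int × Int) := [(-1, 0), (1, 0), (0, 1), (0, -1)]  -- UP DOWN RIGHT LEFT

-- A's recursive `dfs` (dfsA) and its for-loop over `directions` (dfsDirs); the subtype
-- carries the bound on unvisited cells used for termination.
mutual
def dfsA (grid : List (List Int)) (n m : Nat) (v : List (List Bool)) (res : List (Int × Int))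
    (r c : Nat) (hv : pvVget v r c = false) :
    {p : List (List Bool) × List (Int × Int) // pvCountFalse p.1 < pvCountFalse v} :=
  let b := dfsDirs grid n m (pvVset v r c) (res ++ [((r : Int), (c : Int))]) r c dirs4
  ⟨b.val, Nat.lt_of_le_of_lt b.property (pvVset_lt v r c hv)⟩
termination_by (pvCountFalse v, 0)
decreasing_by
  exact Prod.Lex.left _ _ (pvVset_lt v r c hv)

def dfsDirs (grid : List (List Int)) (n m : Nat) (v : List (List Bool)) (res : List (Int × Int))
    (r c : Nat) : (ds : List (Int × Int)) →
    {p : List (List Bool) × List (Int × Int) // pvCountFalse p.1 ≤ pvCountFalse v}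
  | [] => ⟨(v, res), Nat.le_refl _⟩
  | d :: ds =>
    if h : (0 ≤ (r : Int) + d.1 ∧ (r : Int) + d.1 < (n : Int) ∧ 0 ≤ (c : Int) + d.2 ∧ (c : Int) + d.2 < (m : Int) ∧
        pvVget v ((r : Int) + d.1).toNat ((c : Int) + d.2).toNat = false ∧
        pvGridAt grid ((r : Int) + d.1).toNat ((c : Int) + d.2).toNat = 1) then
      let a := dfsA grid n m v res ((r : Int) + d.1).toNat ((c : Int) + d.2).toNat h.2.2.2.2.1
      let b := dfsDirs grid n m a.val.1 a.val.2 r c ds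
      ⟨b.val, Nat.le_trans b.property (Nat.le_of_lt a.property)⟩
    else dfsDirs grid n m v res r c ds
termination_by ds => (pvCountFalse v, ds.length + 1)
decreasing_by
  · exact Prod.Lex.right _ (Nat.zero_lt_succ _)
  · exact Prod.Lex.left _ _ a.property
  · exact Prod.Lex.right _ (Nat.lt_succ_self _)
end

def dfsGrid (grid : List (List Int)) : List (Int × Int) :=
  ((List.range grid.length).foldl (fun s r =>
      (List.range (grid.headD []).length).foldl (fun s c =>
          if h : pvGridAt grid r c = 1 ∧ pvVget s.1 r c = false then
            (dfsA grid grid.length (grid.headD []).length s.1 s.2 r c h.2).val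
          else s) s)
    (List.replicate grid.length (List.replicate (grid.headD []).length false),
     ([] : List (Int × Int)))).2

-- ===== PORT B =====
-- the explicit-stack loop: head of the list = top of the Python stack (its last element);
-- neighbors are pushed in B's reversed direction order (0,-1),(0,1),(1,0),(-1,0)
def loopB (grid : List (List Int)) (n m : Nat) (v : List (List Bool)) (res : List (Int × Int)) :
    List (Nat × Nat) → List (List Bool) × List (Int × Int)
  | [] => (v, res)
  | (r, c) :: rest =>
    if h : pvVget v r c = false then
      loopB grid n m (pvVset v r c) (res ++ [((r : Int), (c : Int))])
        ([((0:Int),(-1:Int)), ((0:Int),(1:Int)), ((1:Int),(0:Int)), ((-1:Int),(0:Int))].foldl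
          (fun st d =>
            if 0 ≤ (r : Int) + d.1 ∧ (r : Int) + d.1 < (n : Int) ∧ 0 ≤ (c : Int) + d.2 ∧ (c : Int) + d.2 < (m : Int) ∧
                pvGridAt grid ((r : Int) + d.1).toNat ((c : Int) + d.2).toNat = 1 then
              (((r : Int) + d.1).toNat, ((c : Int) + d.2).toNat) :: st
            else st) rest)
    else loopB grid n m v res rest
termination_by stack => (pvCountFalse v, stack.length)
decreasing_by
  · exact Prod.Lex.left _ _ (pvVset_lt v r c h)
  · exact Prod.Lex.right _ (Nat.lt_succ_self _)

def dfsGrid_alt (grid : List (List Int)) : List (Int × Int) :=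
  ((List.range grid.length).foldl (fun s r =>
      (List.range (grid.headD []).length).foldl (fun s c =>
          if pvGridAt grid r c = 1 ∧ pvVget s.1 r c = false then
            loopB grid grid.length (grid.headD []).length s.1 s.2 [(r, c)]
          else s) s)
    (List.replicate grid.length (List.replicate (grid.headD []).length false),
     ([] : List (Int × Int)))).2

-- ===== PRECONDITION & SPEC =====
-- Pre_ excludes exactly the inputs where Python A raises IndexError: the empty grid
-- (grid[0]) and grids with some row shorter than the first row (grid[r][c] in the scan).
def Pre_dfsGrid (grid : List (List Int)) : Prop :=
  grid ≠ [] ∧ ∀ row ∈ grid, (grid.headD []).length ≤ row.length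
instance (grid : List (List Int)) : Decidable (Pre_dfsGrid grid) := by unfold Pre_dfsGrid; infer_instance
def pvWitness_dfsGrid : List (List Int) := [[1, 0], [0, 1]]
def Spec_dfsGrid (grid : List (List Int)) (out : List (Int × Int)) : Prop := out = dfsGrid_alt grid
instance (grid : List (List Int)) (out : List (Int × Int)) : Decidable (Spec_dfsGrid grid out) := by unfold Spec_dfsGrid; infer_instance

-- ===== CLAIM (what is proved, stated in full; the proofs are below) =====
def Claim_equal_dfsGrid : Prop := ∀ (grid : List (List Int)), Dom_dfsGrid grid → Pre_dfsGrid grid → Spec_dfsGrid grid (dfsGrid grid)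

-- ===== LEMMAS AND PROOFS =====

-- the in-bounds 1-cells among (r,c)+ds, in A's direction order = B's pop order
def nbrCells (grid : List (List Int)) (n m : Nat) (r c : Nat) (ds : List (Int × Int)) : List (Nat × Nat) :=
  ds.filterMap (fun d =>
    if 0 ≤ (r : Int) + d.1 ∧ (r : Int) + d.1 < (n : Int) ∧ 0 ≤ (c : Int) + d.2 ∧ (c : Int) + d.2 < (m : Int) ∧
        pvGridAt grid ((r : Int) + d.1).toNat ((c : Int) + d.2).toNat = 1 then
      some (((r : Int) + d.1).toNat, ((c : Int) + d.2).toNat)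
    else none)

-- A's traversal driven by a worklist: pop, skip if visited, else run A's recursive dfs
def procAll (grid : List (List Int)) (n m : Nat) :
    List (List Bool) → List (Int × Int) → List (Nat × Nat) → List (List Bool) × List (Int × Int)
  | v, res, [] => (v, res)
  | v, res, (r, c) :: rest =>
    if h : pvVget v r c = false then
      procAll grid n m (dfsA grid n m v res r c h).val.1 (dfsA grid n m v res r c h).val.2 rest
    else procAll grid n m v res rest

theorem push_eq (grid : List (List Int)) (n m : Nat) (r c : Nat) (rest : List (Nat × Nat)) :
    ([((0:Int),(-1:Int)), ((0:Int),(1:Int)), ((1:Int),(0:Int)), ((-1:Int),(0:Int))].foldl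
        (fun st d =>
          if 0 ≤ (r : Int) + d.1 ∧ (r : Int) + d.1 < (n : Int) ∧ 0 ≤ (c : Int) + d.2 ∧ (c : Int) + d.2 < (m : Int) ∧
              pvGridAt grid ((r : Int) + d.1).toNat ((c : Int) + d.2).toNat = 1 then
            (((r : Int) + d.1).toNat, ((c : Int) + d.2).toNat) :: st
          else st) rest) = nbrCells grid n m r c dirs4 ++ rest := by
  simp only [dirs4, nbrCells, List.foldl, List.filterMap]
  split_ifs <;> simp_all

theorem procAll_append (grid : List (List Int)) (n m : Nat) :
    ∀ (S1 : List (Nat × Nat)) (v : List (List Bool)) (res : List (Int × Int)) (S2 : List (Nat × Nat)),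
      procAll grid n m v res (S1 ++ S2) =
        procAll grid n m (procAll grid n m v res S1).1 (procAll grid n m v res S1).2 S2 := by
  intro S1
  induction S1 with
  | nil => intro v res S2; simp [procAll]
  | cons x S1 ih =>
    intro v res S2
    obtain ⟨r, c⟩ := x
    by_cases h : pvVget v r c = false
    · simp only [List.cons_append, procAll, dif_pos h]
      exact ih _ _ S2
    · simp only [List.cons_append, procAll, dif_neg h]
      exact ih _ _ S2

theorem K_dirs (grid : List (List Int)) (n m : Nat) :
    ∀ (N : Nat) (v : List (List Bool)), pvCountFalse v ≤ N →
      ∀ (ds : List (Int × Int)) (res : List (Int × Int)) (r c : Nat),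
        (dfsDirs grid n m v res r c ds).val = procAll grid n m v res (nbrCells grid n m r c ds) := by
  intro N
  induction N using Nat.strong_induction_on with
  | _ N ihN =>
    intro v hvN ds
    induction ds generalizing v with
    | nil => intro res r c; simp [dfsDirs, nbrCells, procAll]
    | cons d ds ihds =>
      intro res r c
      by_cases hbg : (0 ≤ (r : Int) + d.1 ∧ (r : Int) + d.1 < (n : Int) ∧ 0 ≤ (c : Int) + d.2 ∧ (c : Int) + d.2 < (m : Int) ∧
          pvGridAt grid ((r : Int) + d.1).toNat ((c : Int) + d.2).toNat = 1)
      · have hnb : nbrCells grid n m r c (d :: ds) =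
            (((r : Int) + d.1).toNat, ((c : Int) + d.2).toNat) :: nbrCells grid n m r c ds := by
          simp [nbrCells, List.filterMap_cons, if_pos hbg]
        by_cases hvis : pvVget v ((r : Int) + d.1).toNat ((c : Int) + d.2).toNat = false
        · have hfull : (0 ≤ (r : Int) + d.1 ∧ (r : Int) + d.1 < (n : Int) ∧ 0 ≤ (c : Int) + d.2 ∧ (c : Int) + d.2 < (m : Int) ∧
              pvVget v ((r : Int) + d.1).toNat ((c : Int) + d.2).toNat = false ∧
              pvGridAt grid ((r : Int) + d.1).toNat ((c : Int) + d.2).toNat = 1) :=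
            ⟨hbg.1, hbg.2.1, hbg.2.2.1, hbg.2.2.2.1, hvis, hbg.2.2.2.2⟩
          rw [hnb]
          simp only [dfsDirs, dif_pos hfull, procAll, dif_pos hvis]
          have ha := (dfsA grid n m v res ((r : Int) + d.1).toNat ((c : Int) + d.2).toNat hfull.2.2.2.2.1).property
          exact ihN _ (Nat.lt_of_lt_of_le ha hvN) _ (Nat.le_refl _) ds _ r c
        · have hnfull : ¬ (0 ≤ (r : Int) + d.1 ∧ (r : Int) + d.1 < (n : Int) ∧ 0 ≤ (c : Int) + d.2 ∧ (c : Int) + d.2 < (m : Int) ∧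
              pvVget v ((r : Int) + d.1).toNat ((c : Int) + d.2).toNat = false ∧
              pvGridAt grid ((r : Int) + d.1).toNat ((c : Int) + d.2).toNat = 1) :=
            fun hh => hvis hh.2.2.2.2.1
          rw [hnb]
          simp only [dfsDirs, dif_neg hnfull, procAll, dif_neg hvis]
          exact ihds v hvN res r c
      · have hnfull : ¬ (0 ≤ (r : Int) + d.1 ∧ (r : Int) + d.1 < (n : Int) ∧ 0 ≤ (c : Int) + d.2 ∧ (c : Int) + d.2 < (m : Int) ∧
            pvVget v ((r : Int) + d.1).toNat ((c : Int) + d.2).toNat = false ∧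
            pvGridAt grid ((r : Int) + d.1).toNat ((c : Int) + d.2).toNat = 1) :=
          fun hh => hbg ⟨hh.1, hh.2.1, hh.2.2.1, hh.2.2.2.1, hh.2.2.2.2.2⟩
        have hnb : nbrCells grid n m r c (d :: ds) = nbrCells grid n m r c ds := by
          simp [nbrCells, List.filterMap_cons, if_neg hbg]
        rw [hnb]
        simp only [dfsDirs, dif_neg hnfull]
        exact ihds v hvN res r c

theorem K_dfsA (grid : List (List Int)) (n m : Nat) (v : List (List Bool)) (res : List (Int × Int))
    (r c : Nat) (hv : pvVget v r c = false) :
    (dfsA grid n m v res r c hv).val =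
      procAll grid n m (pvVset v r c) (res ++ [((r : Int), (c : Int))]) (nbrCells grid n m r c dirs4) := by
  simp only [dfsA]
  exact K_dirs grid n m _ _ (Nat.le_refl _) dirs4 _ r c

theorem loopB_eq_procAll (grid : List (List Int)) (n m : Nat) (v : List (List Bool))
    (res : List (Int × Int)) (stack : List (Nat × Nat)) :
    loopB grid n m v res stack = procAll grid n m v res stack := by
  induction v, res, stack using loopB.induct grid n m with
  | case1 v res => simp [loopB, procAll]
  | case2 v res r c rest h ih =>
    rw [loopB]
    simp only [dif_pos h]
    rw [push_eq]
    have ih2 : loopB grid n m (pvVset v r c) (res ++ [((r : Int), (c : Int))])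
          (nbrCells grid n m r c dirs4 ++ rest) =
        procAll grid n m (pvVset v r c) (res ++ [((r : Int), (c : Int))])
          (nbrCells grid n m r c dirs4 ++ rest) := by
      rw [← push_eq]; exact ih
    rw [ih2, procAll_append]
    simp only [procAll, dif_pos h]
    rw [← K_dfsA grid n m v res r c h]
  | case3 v res r c rest h ih =>
    rw [loopB]
    simp only [dif_neg h]
    rw [ih]
    simp [procAll, dif_neg h]

theorem seed_eq (grid : List (List Int)) (n m : Nat) (v : List (List Bool))
    (res : List (Int × Int)) (r c : Nat) (h : pvVget v r c = false) :
    loopB grid n m v res [(r, c)] = (dfsA grid n m v res r c h).val := by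
  rw [loopB_eq_procAll]
  simp only [procAll, dif_pos h]

theorem foldl_ext' {α β : Type} (f g : α → β → α) (l : List β)
    (h : ∀ a b, f a b = g a b) : ∀ (a : α), l.foldl f a = l.foldl g a := by
  induction l with
  | nil => intro a; rfl
  | cons x xs ih => intro a; simp only [List.foldl]; rw [h]; exact ih _

theorem dfsGrid_eq (grid : List (List Int)) : dfsGrid grid = dfsGrid_alt grid := by
  unfold dfsGrid dfsGrid_alt
  congr 1
  apply foldl_ext'
  intro s r
  apply foldl_ext'
  intro s c
  by_cases h : pvGridAt grid r c = 1 ∧ pvVget s.1 r c = false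
  · rw [dif_pos h, if_pos h, seed_eq _ _ _ _ _ _ _ h.2]
  · rw [dif_neg h, if_neg h]

-- ===== VERDICT (by name: the statement is the Claim_ definition above) =====
theorem dfsGrid_spec : Claim_equal_dfsGrid := by
  intro grid _ _
  show dfsGrid grid = dfsGrid_alt grid
  exact dfsGrid_eq grid
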